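-- pv_equiv track=rewrite | github.com/meelgroup/manthan | src/createSkolem.py | _normalize_verilog_module_order
-- ===== SOURCE A (Python) =====
-- def _normalize_verilog_module_order(verilog_text):
-- 	# Ensure all declarations appear before assigns/instances within each module.
-- 	lines = verilog_text.splitlines()
-- 	out = []
-- 	i = 0
-- 	while i < len(lines):
-- 		line = lines[i]
-- 		if not line.startswith("module "):
-- 			out.append(line)
-- 			i += 1
-- 			continue
-- 		# Capture one module.
-- 		header = line
-- 		body = []
-- 		i += 1
-- 		while i < len(lines):
-- 			l = lines[i]
-- 			body.append(l)
-- 			if l.strip().startswith("endmodule"):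
-- 				break
-- 			i += 1
-- 		i += 1
-- 		decls = []
-- 		assigns = []
-- 		others = []
-- 		endmodule = None
-- 		in_assign_block = False
-- 		assign_block = []
-- 		for l in body:
-- 			ls = l.lstrip()
-- 			if ls.startswith("endmodule"):
-- 				if assign_block:
-- 					assigns.extend(assign_block)
-- 					assign_block = []
-- 					in_assign_block = False
-- 				endmodule = l
-- 				continue
-- 			if in_assign_block:
-- 				assign_block.append(l)
-- 				if ls.rstrip().endswith(";"):
-- 					assigns.extend(assign_block)
-- 					assign_block = []
-- 					in_assign_block = False
-- 				continue
-- 			if ls.startswith("input ") or ls.startswith("output ") or ls.startswith("wire ") or ls.startswith("reg "):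
-- 				decls.append(l)
-- 			elif ls.startswith("assign "):
-- 				assign_block = [l]
-- 				in_assign_block = True
-- 				if ls.rstrip().endswith(";"):
-- 					assigns.extend(assign_block)
-- 					assign_block = []
-- 					in_assign_block = False
-- 			else:
-- 				others.append(l)
-- 		if assign_block:
-- 			assigns.extend(assign_block)
-- 		out.append(header)
-- 		out.extend(decls)
-- 		out.extend(others)
-- 		out.extend(assigns)
-- 		if endmodule is not None:
-- 			out.append(endmodule)
-- 	return "\n".join(out) + "\n"
-- ===== SOURCE B (Python) =====
-- def _normalize_verilog_module_order(verilog_text):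
-- 	# Single-pass state machine: emit outside lines directly; inside a module,
-- 	# bucket lines into decls/others/assigns and flush at endmodule or end-of-input.
-- 	out = []
-- 	inside = False
-- 	for line in verilog_text.splitlines():
-- 		if not inside:
-- 			if line.startswith("module "):
-- 				header = line
-- 				decls, others, assigns, block = [], [], [], []
-- 				in_block = False
-- 				inside = True
-- 			else:
-- 				out.append(line)
-- 			continue
-- 		ls = line.lstrip()
-- 		if ls.startswith("endmodule"):
-- 			out += [header] + decls + others + assigns + block + [line]
-- 			inside = False
-- 		elif in_block:
-- 			block.append(line)
-- 			if ls.rstrip().endswith(";"):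
-- 				assigns += block
-- 				block = []
-- 				in_block = False
-- 		elif ls.startswith(("input ", "output ", "wire ", "reg ")):
-- 			decls.append(line)
-- 		elif ls.startswith("assign "):
-- 			if ls.rstrip().endswith(";"):
-- 				assigns.append(line)
-- 			else:
-- 				block = [line]
-- 				in_block = True
-- 		else:
-- 			others.append(line)
-- 	if inside:
-- 		out += [header] + decls + others + assigns + block
-- 	return "\n".join(out) + "\n"
-- ===== Notes on version B (the rewrite author's own statement) =====
-- stated objective: simpler
-- what changed: A's outer while loop with a nested body-capture loop plus a separate second classification pass over the captured body is replaced by a single linear state machine over splitlines() that classifies and emits each line in one pass.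
import Mathlib
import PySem

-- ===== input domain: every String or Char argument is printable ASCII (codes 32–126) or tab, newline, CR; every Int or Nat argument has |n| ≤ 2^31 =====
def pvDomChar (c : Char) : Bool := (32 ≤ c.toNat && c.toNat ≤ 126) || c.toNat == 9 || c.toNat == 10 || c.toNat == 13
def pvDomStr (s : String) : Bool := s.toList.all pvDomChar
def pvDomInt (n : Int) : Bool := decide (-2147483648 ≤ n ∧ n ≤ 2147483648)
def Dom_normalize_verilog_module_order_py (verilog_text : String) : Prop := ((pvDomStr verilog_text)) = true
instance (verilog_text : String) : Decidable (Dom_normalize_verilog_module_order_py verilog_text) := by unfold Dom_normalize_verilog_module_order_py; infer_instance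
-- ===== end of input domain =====

-- B replaces A's nested capture-then-reclassify loops by one linear state machine over the lines (simpler single pass, same output).


-- ===== PORT A =====
-- A's inner while loop: collect the module body up to and including the first
-- line whose strip() starts with "endmodule"; second component = remaining lines.
def pvA_takeBody : List String → List String × List String
  | [] => ([], [])
  | l :: rest =>
    if PySem.Str.startswith (PySem.Str.strip l) "endmodule" then ([l], rest)
    else
      let p := pvA_takeBody rest
      (l :: p.1, p.2)

-- classification state of A's `for l in body` loop
structure PvACls where
  decls : List String
  assigns : List String
  others : List String
  endm : Option String
  inb : Bool
  blk : List String

-- one iteration of A's classification loop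
def pvA_clsStep (s : PvACls) (l : String) : PvACls :=
  let ls := PySem.Str.lstrip l
  if PySem.Str.startswith ls "endmodule" then
    if s.blk.isEmpty then { s with endm := some l }
    else { s with assigns := s.assigns ++ s.blk, blk := [], inb := false, endm := some l }
  else if s.inb then
    let blk := s.blk ++ [l]
    if PySem.Str.endswith (PySem.Str.rstrip ls) ";" then
      { s with assigns := s.assigns ++ blk, blk := [], inb := false }
    else { s with blk := blk }
  else if PySem.Str.startswith ls "input " || PySem.Str.startswith ls "output "
       || PySem.Str.startswith ls "wire " || PySem.Str.startswith ls "reg " then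
    { s with decls := s.decls ++ [l] }
  else if PySem.Str.startswith ls "assign " then
    if PySem.Str.endswith (PySem.Str.rstrip ls) ";" then
      { s with assigns := s.assigns ++ [l], blk := [], inb := false }
    else { s with blk := [l], inb := true }
  else { s with others := s.others ++ [l] }

-- A's tail of a module: final flush of assign_block, then header/decls/others/assigns/endmodule
def pvA_emit (header : String) (s : PvACls) : List String :=
  let assigns := if s.blk.isEmpty then s.assigns else s.assigns ++ s.blk
  [header] ++ s.decls ++ s.others ++ assigns ++ (match s.endm with | some e => [e] | none => [])

theorem pvA_takeBody_len (ls : List String) : (pvA_takeBody ls).2.length ≤ ls.length := by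
  induction ls with
  | nil => simp [pvA_takeBody]
  | cons l rest ih =>
    simp only [pvA_takeBody]
    split
    · simp
    · simpa using Nat.le_succ_of_le ih

-- A's outer while loop over the lines
def pvA_go : List String → List String
  | [] => []
  | line :: rest =>
    if PySem.Str.startswith line "module " then
      let p := pvA_takeBody rest
      let s := List.foldl pvA_clsStep ⟨[], [], [], none, false, []⟩ p.1
      pvA_emit line s ++ pvA_go p.2
    else line :: pvA_go rest
termination_by ls => ls.length
decreasing_by
  · exact Nat.lt_succ_of_le (pvA_takeBody_len rest)
  · simp

def normalize_verilog_module_order_py (verilog_text : String) : String :=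
  PySem.Str.join "\n" (pvA_go (PySem.Str.splitlines verilog_text)) ++ "\n"

-- ===== PORT B =====
-- state of B's single for-loop (header/… are meaningful only while inside = true)
structure PvBSt where
  out : List String
  inside : Bool
  header : String
  decls : List String
  others : List String
  assigns : List String
  blk : List String
  inb : Bool

def pvB_step (s : PvBSt) (line : String) : PvBSt :=
  if s.inside = false then
    if PySem.Str.startswith line "module " then
      { s with inside := true, header := line, decls := [], others := [], assigns := [], blk := [], inb := false }
    else { s with out := s.out ++ [line] }
  else
    let ls := PySem.Str.lstrip line
    if PySem.Str.startswith ls "endmodule" then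
      { s with out := s.out ++ [s.header] ++ s.decls ++ s.others ++ s.assigns ++ s.blk ++ [line], inside := false }
    else if s.inb then
      let blk := s.blk ++ [line]
      if PySem.Str.endswith (PySem.Str.rstrip ls) ";" then
        { s with assigns := s.assigns ++ blk, blk := [], inb := false }
      else { s with blk := blk }
    else if PySem.Str.startswith ls "input " || PySem.Str.startswith ls "output "
         || PySem.Str.startswith ls "wire " || PySem.Str.startswith ls "reg " then
      { s with decls := s.decls ++ [line] }
    else if PySem.Str.startswith ls "assign " then
      if PySem.Str.endswith (PySem.Str.rstrip ls) ";" then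
        { s with assigns := s.assigns ++ [line] }
      else { s with blk := [line], inb := true }
    else { s with others := s.others ++ [line] }

-- B's final `if inside:` flush
def pvB_finish (s : PvBSt) : List String :=
  if s.inside then s.out ++ [s.header] ++ s.decls ++ s.others ++ s.assigns ++ s.blk else s.out

def normalize_verilog_module_order_py_alt (verilog_text : String) : String :=
  PySem.Str.join "\n"
    (pvB_finish (List.foldl pvB_step ⟨[], false, "", [], [], [], [], false⟩
      (PySem.Str.splitlines verilog_text))) ++ "\n"

-- ===== PRECONDITION & SPEC =====
def Spec_normalize_verilog_module_order_py (verilog_text : String) (out : String) : Prop := out = normalize_verilog_module_order_py_alt verilog_text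
instance (verilog_text : String) (out : String) : Decidable (Spec_normalize_verilog_module_order_py verilog_text out) := by unfold Spec_normalize_verilog_module_order_py; infer_instance

-- ===== CLAIM (what is proved, stated in full; the proofs are below) =====
def Claim_equal_normalize_verilog_module_order_py : Prop := ∀ (verilog_text : String), Dom_normalize_verilog_module_order_py verilog_text → Spec_normalize_verilog_module_order_py verilog_text (normalize_verilog_module_order_py verilog_text)

-- ===== LEMMAS AND PROOFS =====

-- "endmodule" is still (or newly) a prefix after stripping trailing whitespace:
-- its last char is not whitespace, so rstrip never disturbs the prefix.
theorem pv_rstrip_em (s : List Char) :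
    PySem.Chars.startswith (PySem.Chars.rstrip s) "endmodule".toList
      = PySem.Chars.startswith s "endmodule".toList := by
  rw [Bool.eq_iff_iff]
  simp only [PySem.Chars.startswith_iff]
  constructor
  · intro hp
    refine hp.trans ?_
    have h : (List.dropWhile PySem.Chars.isspace s.reverse).reverse <+: s.reverse.reverse :=
      List.reverse_prefix.mpr (List.dropWhile_suffix _)
    simpa [PySem.Chars.rstrip] using h
  · rintro ⟨t, rfl⟩
    rw [PySem.Chars.rstrip, List.reverse_append, List.dropWhile_append]
    split
    · have h : List.dropWhile PySem.Chars.isspace ("endmodule".toList.reverse)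
          = "endmodule".toList.reverse := by decide
      rw [h]; simp
    · rw [List.reverse_append]
      simp

-- the two tests A uses for "endmodule" lines (strip vs lstrip) coincide
theorem pv_strip_lstrip_em (l : String) :
    PySem.Str.startswith (PySem.Str.strip l) "endmodule"
      = PySem.Str.startswith (PySem.Str.lstrip l) "endmodule" := by
  simp only [PySem.Str.startswith_eq, PySem.Str.toList_strip, PySem.Str.toList_lstrip,
    PySem.Chars.strip]
  exact pv_rstrip_em _

-- on a non-endmodule line, B's inside-step performs exactly A's classification step
theorem pv_step_match (line h d o a blk : _) (inb : Bool) (outl : List String)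
    (hne : PySem.Str.startswith (PySem.Str.lstrip line) "endmodule" = false)
    (hinv : inb = false → blk = []) :
    ∃ d' o' a' blk' inb',
      pvB_step ⟨outl, true, h, d, o, a, blk, inb⟩ line = ⟨outl, true, h, d', o', a', blk', inb'⟩ ∧
      pvA_clsStep ⟨d, a, o, none, inb, blk⟩ line = ⟨d', a', o', none, inb', blk'⟩ ∧
      (inb' = false → blk' = []) := by
  simp at hne
  cases inb with
  | true =>
    by_cases hend : PySem.Chars.endswith (PySem.Chars.rstrip (PySem.Chars.lstrip line.toList)) [';'] = true
    · exact ⟨d, o, a ++ (blk ++ [line]), [], false,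
        by simp [pvB_step, hne, hend], by simp [pvA_clsStep, hne, hend], fun _ => rfl⟩
    · exact ⟨d, o, a, blk ++ [line], true,
        by simp [pvB_step, hne, hend], by simp [pvA_clsStep, hne, hend], by simp⟩
  | false =>
    have hblk : blk = [] := hinv rfl
    subst hblk
    by_cases hdecl : ((PySem.Chars.startswith (PySem.Chars.lstrip line.toList) ['i', 'n', 'p', 'u', 't', ' '] = true ∨
          PySem.Chars.startswith (PySem.Chars.lstrip line.toList) ['o', 'u', 't', 'p', 'u', 't', ' '] = true) ∨
        PySem.Chars.startswith (PySem.Chars.lstrip line.toList) ['w', 'i', 'r', 'e', ' '] = true) ∨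
      PySem.Chars.startswith (PySem.Chars.lstrip line.toList) ['r', 'e', 'g', ' '] = true
    · exact ⟨d ++ [line], o, a, [], false,
        by simp [pvB_step, hne, hdecl], by simp [pvA_clsStep, hne, hdecl], fun _ => rfl⟩
    · by_cases hasg : PySem.Chars.startswith (PySem.Chars.lstrip line.toList) ['a', 's', 's', 'i', 'g', 'n', ' '] = true
      · by_cases hend : PySem.Chars.endswith (PySem.Chars.rstrip (PySem.Chars.lstrip line.toList)) [';'] = true
        · exact ⟨d, o, a ++ [line], [], false,
            by simp [pvB_step, hne, hdecl, hasg, hend], by simp [pvA_clsStep, hne, hdecl, hasg, hend], fun _ => rfl⟩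
        · exact ⟨d, o, a, [line], true,
            by simp [pvB_step, hne, hdecl, hasg, hend], by simp [pvA_clsStep, hne, hdecl, hasg, hend], by simp⟩
      · exact ⟨d, o ++ [line], a, [], false,
          by simp [pvB_step, hne, hdecl, hasg], by simp [pvA_clsStep, hne, hdecl, hasg], fun _ => rfl⟩

-- B inside a module computes A's classification of the captured body, then resumes as A does
theorem pv_inside (n : ℕ)
    (IH : ∀ ls : List String, ls.length ≤ n → ∀ (outl : List String) (h : String)
      (d o a blk : List String) (inb : Bool),
      pvB_finish (List.foldl pvB_step ⟨outl, false, h, d, o, a, blk, inb⟩ ls) = outl ++ pvA_go ls) :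
    ∀ ls : List String, ls.length ≤ n → ∀ (outl : List String) (h : String)
      (d o a blk : List String) (inb : Bool), (inb = false → blk = []) →
      pvB_finish (List.foldl pvB_step ⟨outl, true, h, d, o, a, blk, inb⟩ ls)
        = outl ++ pvA_emit h (List.foldl pvA_clsStep ⟨d, a, o, none, inb, blk⟩ (pvA_takeBody ls).1)
            ++ pvA_go (pvA_takeBody ls).2 := by
  intro ls
  induction ls with
  | nil =>
    intro _ outl h d o a blk inb hinv
    by_cases hb : blk = [] <;>
      simp [pvB_finish, pvA_takeBody, pvA_emit, pvA_go, hb, List.append_assoc]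
  | cons line rest ihq =>
    intro hlen outl h d o a blk inb hinv
    have hlen' : rest.length ≤ n := by
      simpa using Nat.le_of_succ_le (by simpa using hlen)
    by_cases hE : PySem.Str.startswith (PySem.Str.lstrip line) "endmodule" = true
    · have hS : PySem.Str.startswith (PySem.Str.strip line) "endmodule" = true := by
        rw [pv_strip_lstrip_em]; exact hE
      simp at hE hS
      have hstep : pvB_step ⟨outl, true, h, d, o, a, blk, inb⟩ line
          = ⟨outl ++ [h] ++ d ++ o ++ a ++ blk ++ [line], false, h, d, o, a, blk, inb⟩ := by
        simp [pvB_step, hE]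
      rw [List.foldl_cons, hstep, IH rest hlen']
      have htb : pvA_takeBody (line :: rest) = ([line], rest) := by
        simp [pvA_takeBody, hS]
      rw [htb]
      by_cases hb : blk = []
      · simp [pvA_clsStep, hE, hb, pvA_emit, List.append_assoc]
      · simp [pvA_clsStep, hE, hb, pvA_emit, List.append_assoc]
    · have hE' : PySem.Str.startswith (PySem.Str.lstrip line) "endmodule" = false := by
        simpa using hE
      have hS : PySem.Str.startswith (PySem.Str.strip line) "endmodule" = false := by
        rw [pv_strip_lstrip_em]; exact hE'
      simp at hS
      obtain ⟨d', o', a', blk', inb', hB, hA, hinv'⟩ :=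
        pv_step_match line h d o a blk inb outl hE' hinv
      have htb : pvA_takeBody (line :: rest)
          = (line :: (pvA_takeBody rest).1, (pvA_takeBody rest).2) := by
        simp [pvA_takeBody, hS]
      rw [List.foldl_cons, hB, ihq hlen' outl h d' o' a' blk' inb' hinv', htb]
      simp only [List.foldl_cons, hA]

-- main loop correspondence: B's fold from an outside state appends exactly A's output
theorem pv_outside : ∀ (n : ℕ) (ls : List String), ls.length ≤ n →
    ∀ (outl : List String) (h : String) (d o a blk : List String) (inb : Bool),
    pvB_finish (List.foldl pvB_step ⟨outl, false, h, d, o, a, blk, inb⟩ ls) = outl ++ pvA_go ls := by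
  intro n
  induction n with
  | zero =>
    intro ls hlen outl h d o a blk inb
    have : ls = [] := List.length_eq_zero_iff.mp (Nat.le_zero.mp hlen)
    subst this
    simp [pvB_finish, pvA_go]
  | succ n ihn =>
    intro ls hlen outl h d o a blk inb
    cases ls with
    | nil => simp [pvB_finish, pvA_go]
    | cons line rest =>
      have hlen' : rest.length ≤ n := by simpa using Nat.succ_le_succ_iff.mp (by simpa using hlen)
      by_cases hM : PySem.Str.startswith line "module " = true
      · simp at hM
        have hstep : pvB_step ⟨outl, false, h, d, o, a, blk, inb⟩ line
            = ⟨outl, true, line, [], [], [], [], false⟩ := by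
          simp [pvB_step, hM]
        rw [List.foldl_cons, hstep,
          pv_inside n (fun ls hl => ihn ls hl) rest hlen' outl line [] [] [] [] false (fun _ => rfl)]
        have hgo : pvA_go (line :: rest)
            = pvA_emit line (List.foldl pvA_clsStep ⟨[], [], [], none, false, []⟩ (pvA_takeBody rest).1)
                ++ pvA_go (pvA_takeBody rest).2 := by
          rw [pvA_go]; simp [hM]
        rw [hgo, List.append_assoc]
      · simp at hM
        have hstep : pvB_step ⟨outl, false, h, d, o, a, blk, inb⟩ line
            = ⟨outl ++ [line], false, h, d, o, a, blk, inb⟩ := by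
          simp [pvB_step, hM]
        have hgo : pvA_go (line :: rest) = line :: pvA_go rest := by
          rw [pvA_go]; simp [hM]
        rw [List.foldl_cons, hstep, ihn rest hlen', hgo]
        simp

-- ===== VERDICT (by name: the statement is the Claim_ definition above) =====
theorem normalize_verilog_module_order_py_spec : Claim_equal_normalize_verilog_module_order_py := by
  intro verilog_text _
  unfold Spec_normalize_verilog_module_order_py
  unfold normalize_verilog_module_order_py normalize_verilog_module_order_py_alt
  rw [pv_outside (PySem.Str.splitlines verilog_text).length _ le_rfl]
  simp
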